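-- pv_equiv track=rewrite | github.com/ForeverHaibara/Triple-SOS | src/utils/text_process.py | _preprocess_text_expansion
-- ===== SOURCE A (Python) =====
-- def next_permute(f: str) -> str:
--     """a^3 * b^2 * c   ->   b^3 * c^2 * a"""
--     return f.translate({97: 98, 98: 99, 99: 97})
--
-- def cycle_expansion(f, symbol='s'):
--     '''
--     Parameters
--     -------
--     f: str
--         the string of the polynomial with variables a , b , c
--     symbol: char, 's' or 'p'
--         when symbol == 's':
--             a^3 * b^2 * c   ->   a^3 * b^2 * c + b^3 * c^2 * a + c^3 * a^2 * b
--         when symbol == 'p':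
--             a^3 * b^2 * c   ->   a^3 * b^2 * c * b^3 * c^2 * a * c^3 * a^2 * b
--         Warning : Please add parenthesis yourself before expansion if necessary
--
--     Return
--     -------
--     a string, the result of cycle expansion
--     '''
--     fb = next_permute(f)
--     fc = next_permute(fb)
--     if symbol != 'p':
--         return ' + '.join([f, fb, fc])
--     return ' * '.join([f, fb, fc])
--
-- def _preprocess_text_expansion(poly: str):
--     """
--     Expand the polynomial with cycle expansion.
--
--     s(ab)    ->   (ab + bc + ca)
--
--     p(a+b)   ->   (a+b)(b+c)(c+a)
--     """
--     parenthesis = 0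
--     paren_depth = [-1]
--     cycle_begin = []
--
--     i = 0
--     while i < len(poly):
--         if (poly[i] == 's' and i+4 <= len(poly) and poly[i:i+4]!='sqrt')  or poly[i] == 'p':
--             paren_depth.append(parenthesis)
--             cycle_begin.append(i)
--         elif poly[i] == '(':
--             parenthesis += 1
--         elif poly[i] == ')':
--             parenthesis -= 1
--             if paren_depth[-1] == parenthesis:
--                 tmp = '(' + cycle_expansion(poly[cycle_begin[-1]+1:i+1], symbol=poly[cycle_begin[-1]]) + ')'
--                 poly = poly[:cycle_begin[-1]] + tmp + poly[i+1:]
--                 i = cycle_begin[-1] + len(tmp) - 1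
--                 paren_depth.pop()
--                 cycle_begin.pop()
--         i += 1
--     return poly
-- ===== SOURCE B (Python) =====
-- def next_permute(f: str) -> str:
--     return f.translate({97: 98, 98: 99, 99: 97})
--
-- def cycle_expansion(f, symbol='s'):
--     fb = next_permute(f)
--     fc = next_permute(fb)
--     if symbol != 'p':
--         return ' + '.join([f, fb, fc])
--     return ' * '.join([f, fb, fc])
--
-- def _preprocess_text_expansion(poly: str):
--     """One left-to-right pass with a stack of output builders: a marker opens a
--     frame; the ')' returning to the marker's depth closes it and expands the
--     frame's text, so no in-place splicing or index rewinding is needed."""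
--     n = len(poly)
--     cur = ''
--     stack = []  # (marker_char, paren_depth_at_marker, text_accumulated_below)
--     depth = 0
--     for i in range(n):
--         c = poly[i]
--         if c == 'p' or (c == 's' and i + 4 <= n and poly[i:i+4] != 'sqrt'):
--             stack.append((c, depth, cur))
--             cur = ''
--         else:
--             cur += c
--             if c == '(':
--                 depth += 1
--             elif c == ')':
--                 depth -= 1
--                 if stack and stack[-1][1] == depth:
--                     sym, _, saved = stack.pop()
--                     cur = saved + '(' + cycle_expansion(cur, symbol=sym) + ')'
--     while stack:  # markers that never found their closing ')' stay verbatim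
--         sym, _, saved = stack.pop()
--         cur = saved + sym + cur
--     return cur
-- ===== Notes on version B (the rewrite author's own statement) =====
-- stated objective: alternative
-- what changed: Replaces A's in-place splice-and-rewind loop (rewrite poly around each matched marker and jump the index past the insertion) with a single left-to-right pass that keeps a stack of output builders: a marker opens a frame and the ')' returning to the marker's depth closes it and expands the frame's text, so the string is never rewritten or rescanned.
-- outside the precondition, e.g. on _preprocess_text_expansion(')'): A raises IndexError, B returns ')'
import Mathlib
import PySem

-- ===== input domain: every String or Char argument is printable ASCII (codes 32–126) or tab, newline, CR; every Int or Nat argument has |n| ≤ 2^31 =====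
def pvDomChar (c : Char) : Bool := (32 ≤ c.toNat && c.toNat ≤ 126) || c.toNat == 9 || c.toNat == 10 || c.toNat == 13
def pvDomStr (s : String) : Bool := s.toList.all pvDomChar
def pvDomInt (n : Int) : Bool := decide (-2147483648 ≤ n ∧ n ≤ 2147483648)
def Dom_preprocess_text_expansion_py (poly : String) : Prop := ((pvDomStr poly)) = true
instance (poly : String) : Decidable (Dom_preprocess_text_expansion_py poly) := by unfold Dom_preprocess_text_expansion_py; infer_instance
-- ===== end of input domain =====

-- B replaces A's in-place string splicing (rewrite poly, rewind the index) by a single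
-- left-to-right pass with a stack of output builders; equivalence of the RETURN value.

-- ===== PORT A =====
-- module helpers next_permute / cycle_expansion (shared: B's Python calls the same helpers)
def nextPermuteChars (f : List Char) : List Char :=
  f.map (fun c => if c = 'a' then 'b' else if c = 'b' then 'c' else if c = 'c' then 'a' else c)

def cycleExpansionChars (f : List Char) (symbol : Char) : List Char :=
  let fb := nextPermuteChars f
  let fc := nextPermuteChars fb
  if symbol ≠ 'p' then f ++ [' ', '+', ' '] ++ fb ++ [' ', '+', ' '] ++ fc
  else f ++ [' ', '*', ' '] ++ fb ++ [' ', '*', ' '] ++ fc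

-- A's while loop; indices are provably in range on every path taken, so poly.getD / take / drop
-- are exactly Python's poly[i], poly[a:b].  On the IndexError path (cycle_begin empty) it
-- returns the current poly; Pre_ excludes those inputs.
def aLoop (poly : List Char) (i : Nat) (par : Int) (pd : List Int) (cb : List Nat) : List Char :=
  if i < poly.length then
    let c := poly.getD i ' '
    if (c = 's' ∧ i + 4 ≤ poly.length ∧ (poly.drop i).take 4 ≠ ['s', 'q', 'r', 't']) ∨ c = 'p' then
      aLoop poly (i + 1) par (par :: pd) (i :: cb)
    else if c = '(' then
      aLoop poly (i + 1) (par + 1) pd cb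
    else if c = ')' then
      if pd.head? = some (par - 1) then
        match cb with
        | b :: cbt =>
          let tmp := '(' :: cycleExpansionChars ((poly.drop (b + 1)).take (i - b)) (poly.getD b ' ') ++ [')']
          aLoop (poly.take b ++ tmp ++ poly.drop (i + 1)) (b + tmp.length) (par - 1) pd.tail cbt
        | [] => poly   -- Python raises IndexError here (outside Pre_)
      else aLoop poly (i + 1) (par - 1) pd cb
    else aLoop poly (i + 1) par pd cb
  else poly
termination_by poly.length - i
decreasing_by
  all_goals simp_all [List.length_append, List.length_take, List.length_drop]
  all_goals omega

def preprocess_text_expansion_py (poly : String) : String :=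
  String.ofList (aLoop poly.toList 0 0 [-1] [])

-- ===== PORT B =====
-- B's final flush loop: pop each unmatched frame, re-attaching its marker char verbatim
def rebuildStack : List (Char × Int × List Char) → List Char → List Char
  | [], cur => cur
  | (m, _, saved) :: t, cur => rebuildStack t (saved ++ m :: cur)

-- B's for-loop over the characters: stack frames (marker, depth at marker, text below)
def bGo : List Char → Int → List (Char × Int × List Char) → List Char → List Char
  | [], _, stack, cur => rebuildStack stack cur
  | c :: rest, depth, stack, cur =>
    if (c = 's' ∧ rest.length + 1 ≥ 4 ∧ (c :: rest).take 4 ≠ ['s', 'q', 'r', 't']) ∨ c = 'p' then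
      bGo rest depth ((c, depth, cur) :: stack) []
    else if c = '(' then bGo rest (depth + 1) stack (cur ++ [c])
    else if c = ')' then
      match stack with
      | (sym, d, saved) :: t =>
        if d = depth - 1 then
          bGo rest (depth - 1) t (saved ++ '(' :: cycleExpansionChars (cur ++ [c]) sym ++ [')'])
        else bGo rest (depth - 1) ((sym, d, saved) :: t) (cur ++ [c])
      | [] => bGo rest (depth - 1) [] (cur ++ [c])
    else bGo rest depth stack (cur ++ [c])

def preprocess_text_expansion_py_alt (poly : String) : String :=
  String.ofList (bGo poly.toList 0 [] [])

-- ===== PRECONDITION & SPEC =====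
-- Pre_ excludes exactly the inputs on which A raises IndexError: those where some ')' brings the
-- parenthesis depth to -1 while no s/p marker is pending.  Like balancedness, this is inherently a
-- matching condition on the string; preScan is the plain bookkeeping scan that checks it (running
-- paren depth plus the stack of pending marker depths) — it rewrites nothing and builds no output.
def preScan : List Char → Int → List Int → Bool
  | [], _, _ => true
  | c :: rest, depth, marks =>
    if (c = 's' ∧ rest.length + 1 ≥ 4 ∧ (c :: rest).take 4 ≠ ['s', 'q', 'r', 't']) ∨ c = 'p' then
      preScan rest depth (depth :: marks)
    else if c = '(' then preScan rest (depth + 1) marks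
    else if c = ')' then
      match marks with
      | d :: mt => if d = depth - 1 then preScan rest (depth - 1) mt
                   else preScan rest (depth - 1) (d :: mt)
      | [] => if depth - 1 = -1 then false else preScan rest (depth - 1) []
    else preScan rest depth marks

def Pre_preprocess_text_expansion_py (poly : String) : Prop :=
  preScan poly.toList 0 [] = true
instance (poly : String) : Decidable (Pre_preprocess_text_expansion_py poly) := by
  unfold Pre_preprocess_text_expansion_py; infer_instance

def pvWitness_preprocess_text_expansion_py : String := "s(a*b) + p(a+b)"

def Spec_preprocess_text_expansion_py (poly : String) (out : String) : Prop :=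
  out = preprocess_text_expansion_py_alt poly
instance (poly : String) (out : String) : Decidable (Spec_preprocess_text_expansion_py poly out) := by
  unfold Spec_preprocess_text_expansion_py; infer_instance

-- ===== CLAIM (what is proved, stated in full; the proofs are below) =====
def Claim_equal_preprocess_text_expansion_py : Prop := ∀ (poly : String), Dom_preprocess_text_expansion_py poly → Pre_preprocess_text_expansion_py poly → Spec_preprocess_text_expansion_py poly (preprocess_text_expansion_py poly)


-- ===== LEMMAS AND PROOFS =====

theorem rebuildStack_append (t : List (Char × Int × List Char)) :
    ∀ x y : List Char, rebuildStack t (x ++ y) = rebuildStack t x ++ y := by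
  induction t with
  | nil => intro x y; rfl
  | cons e t ih =>
    intro x y
    obtain ⟨m, d, saved⟩ := e
    show rebuildStack t (saved ++ m :: (x ++ y)) = rebuildStack t (saved ++ m :: x) ++ y
    rw [show saved ++ m :: (x ++ y) = (saved ++ m :: x) ++ y by simp]
    exact ih _ _

-- positions of the pending markers in the current text (A's cycle_begin, last first)
def positionsOf : List (Char × Int × List Char) → List Nat
  | [] => []
  | (_, _, saved) :: t => (rebuildStack t saved).length :: positionsOf t

theorem aLoop_eq_bGo (R : List Char) :
    ∀ (stack : List (Char × Int × List Char)) (cur : List Char) (par : Int),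
      preScan R par (stack.map (fun x => x.2.1)) = true →
      aLoop (rebuildStack stack cur ++ R) (rebuildStack stack cur).length par
        (stack.map (fun x => x.2.1) ++ [-1]) (positionsOf stack)
      = bGo R par stack cur := by
  induction R with
  | nil =>
    intro stack cur par _
    rw [aLoop.eq_def, bGo]; simp
  | cons c R' ih =>
    intro stack cur par hpre
    have hdrop : (rebuildStack stack cur ++ c :: R').drop (rebuildStack stack cur).length = c :: R' :=
      List.drop_left
    have hlen : (rebuildStack stack cur ++ c :: R').length
        = (rebuildStack stack cur).length + (R'.length + 1) := by simp
    have hlt : (rebuildStack stack cur).length < (rebuildStack stack cur ++ c :: R').length := by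
      rw [hlen]; omega
    have hgetc : (rebuildStack stack cur ++ c :: R').getD (rebuildStack stack cur).length ' ' = c := by
      simp [List.getD]
    rw [aLoop.eq_def, if_pos hlt]; simp only [hgetc]
    by_cases hm : (c = 's' ∧ R'.length + 1 ≥ 4 ∧ (c :: R').take 4 ≠ ['s', 'q', 'r', 't']) ∨ c = 'p'
    · -- marker case
      have hmA : (c = 's' ∧ (rebuildStack stack cur).length + 4 ≤ (rebuildStack stack cur ++ c :: R').length
          ∧ ((rebuildStack stack cur ++ c :: R').drop (rebuildStack stack cur).length).take 4 ≠ ['s','q','r','t']) ∨ c = 'p' := by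
        rw [hdrop, hlen]
        rcases hm with ⟨h1, h2, h3⟩ | h
        · exact Or.inl ⟨h1, by omega, h3⟩
        · exact Or.inr h
      rw [if_pos hmA]
      rw [bGo.eq_def]; dsimp only
      rw [if_pos hm]
      rw [preScan.eq_def] at hpre; dsimp only at hpre; rw [if_pos hm] at hpre
      have := ih ((c, par, cur) :: stack) [] par hpre
      simp only [rebuildStack, positionsOf, List.map] at this ⊢
      rw [← this]
      congr 1
      · rw [rebuildStack_append stack cur [c]]; simp
      · rw [rebuildStack_append stack cur [c]]; simp
    · have hmA : ¬ ((c = 's' ∧ (rebuildStack stack cur).length + 4 ≤ (rebuildStack stack cur ++ c :: R').length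
          ∧ ((rebuildStack stack cur ++ c :: R').drop (rebuildStack stack cur).length).take 4 ≠ ['s','q','r','t']) ∨ c = 'p') := by
        rw [hdrop, hlen]
        intro h; apply hm
        rcases h with ⟨h1, h2, h3⟩ | h
        · exact Or.inl ⟨h1, by omega, h3⟩
        · exact Or.inr h
      rw [if_neg hmA]
      rw [bGo.eq_def]; dsimp only
      rw [if_neg hm]
      rw [preScan.eq_def] at hpre; dsimp only at hpre; rw [if_neg hm] at hpre
      by_cases hpar : c = '('
      · subst hpar
        rw [if_pos rfl, if_pos rfl]
        rw [if_pos rfl] at hpre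
        have := ih stack (cur ++ ['(']) (par + 1) hpre
        rw [rebuildStack_append stack cur ['(']] at this
        simpa using this
      · rw [if_neg hpar, if_neg hpar]
        rw [if_neg hpar] at hpre
        by_cases hcp : c = ')'
        · subst hcp
          rw [if_pos rfl, if_pos rfl]
          rw [if_pos rfl] at hpre
          cases stack with
          | nil =>
            simp only [List.map, positionsOf] at hpre ⊢
            try dsimp only at hpre ⊢
            by_cases hz : par - 1 = -1
            · rw [if_pos hz] at hpre; exact absurd hpre (by simp)
            · rw [if_neg hz] at hpre
              have hne : ¬ (([] : List Int) ++ [-1]).head? = some (par - 1) := by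
                simp; omega
              rw [if_neg hne]
              have := ih [] (cur ++ [')']) (par - 1) hpre
              rw [rebuildStack_append [] cur [')']] at this
              simp only [List.map, positionsOf] at this
              simpa using this
          | cons e t =>
            obtain ⟨sym, d, saved⟩ := e
            have hPe : rebuildStack ((sym, d, saved) :: t) cur
                = rebuildStack t saved ++ sym :: cur := by
              show rebuildStack t (saved ++ sym :: cur) = _
              exact rebuildStack_append t saved (sym :: cur)
            simp only [List.map, positionsOf] at hpre ⊢
            try dsimp only at hpre ⊢
            by_cases hd : d = par - 1
            · -- the matching ')': A splices, B closes the frame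
              rw [if_pos hd] at hpre
              have hhead : ((d :: List.map (fun x : Char × Int × List Char => x.2.1) t) ++ [-1]).head? = some (par - 1) := by
                simp [hd]
              rw [if_pos hhead]
              -- abbreviations
              have hQ :
                  rebuildStack ((sym, d, saved) :: t) cur ++ ')' :: R'
                    = rebuildStack t saved ++ sym :: (cur ++ ')' :: R') := by
                rw [hPe]; simp
              -- take b poly = Q
              have htake : List.take (rebuildStack t saved).length
                  (rebuildStack ((sym, d, saved) :: t) cur ++ ')' :: R') = rebuildStack t saved := by
                rw [hQ]
                exact List.take_left
              have hgetb : (rebuildStack ((sym, d, saved) :: t) cur ++ ')' :: R').getD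
                  (rebuildStack t saved).length ' ' = sym := by
                rw [hQ]; simp [List.getD]
              have hdrop1 : List.drop ((rebuildStack t saved).length + 1)
                  (rebuildStack ((sym, d, saved) :: t) cur ++ ')' :: R') = cur ++ ')' :: R' := by
                have : rebuildStack ((sym, d, saved) :: t) cur ++ ')' :: R'
                    = (rebuildStack t saved ++ [sym]) ++ (cur ++ ')' :: R') := by rw [hQ]; simp
                rw [this]
                have hl : (rebuildStack t saved ++ [sym]).length = (rebuildStack t saved).length + 1 := by simp
                rw [← hl]
                exact List.drop_left
              have hilen : (rebuildStack ((sym, d, saved) :: t) cur).length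
                  = (rebuildStack t saved).length + 1 + cur.length := by rw [hPe]; simp; omega
              have htake2 : List.take ((rebuildStack ((sym, d, saved) :: t) cur).length - (rebuildStack t saved).length)
                  (cur ++ ')' :: R') = cur ++ [')'] := by
                rw [hilen]
                have h1 : (rebuildStack t saved).length + 1 + cur.length - (rebuildStack t saved).length
                    = (cur ++ [')']).length := by simp; omega
                rw [h1]
                have : cur ++ ')' :: R' = (cur ++ [')']) ++ R' := by simp
                rw [this]
                exact List.take_left
              have hdropend : List.drop ((rebuildStack ((sym, d, saved) :: t) cur).length + 1)
                  (rebuildStack ((sym, d, saved) :: t) cur ++ ')' :: R') = R' := by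
                have : rebuildStack ((sym, d, saved) :: t) cur ++ ')' :: R'
                    = (rebuildStack ((sym, d, saved) :: t) cur ++ [')']) ++ R' := by simp
                rw [this]
                have hl : (rebuildStack ((sym, d, saved) :: t) cur ++ [')']).length
                    = (rebuildStack ((sym, d, saved) :: t) cur).length + 1 := by simp
                rw [← hl]
                exact List.drop_left
              rw [htake, hgetb, hdrop1, htake2, hdropend]
              rw [if_pos hd]
              have hre : rebuildStack t (saved ++ '(' :: cycleExpansionChars (cur ++ [')']) sym ++ [')'])
                  = rebuildStack t saved ++ '(' :: cycleExpansionChars (cur ++ [')']) sym ++ [')'] := by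
                have := rebuildStack_append t saved ('(' :: cycleExpansionChars (cur ++ [')']) sym ++ [')'])
                simpa using this
              have := ih t (saved ++ '(' :: cycleExpansionChars (cur ++ [')']) sym ++ [')']) (par - 1) hpre
              rw [hre] at this
              rw [← this]
              congr 1 <;> simp
            · rw [if_neg hd] at hpre
              have hne : ¬ ((d :: List.map (fun x : Char × Int × List Char => x.2.1) t) ++ [-1]).head? = some (par - 1) := by
                simp [hd]
              rw [if_neg hne, if_neg hd]
              have := ih ((sym, d, saved) :: t) (cur ++ [')']) (par - 1) hpre
              rw [rebuildStack_append ((sym, d, saved) :: t) cur [')']] at this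
              simp only [List.map, positionsOf] at this
              simpa using this
        · rw [if_neg hcp, if_neg hcp]
          rw [if_neg hcp] at hpre
          have := ih stack (cur ++ [c]) par hpre
          rw [rebuildStack_append stack cur [c]] at this
          simpa using this

-- ===== VERDICT (by name: the statement is the Claim_ definition above) =====
theorem preprocess_text_expansion_py_spec : Claim_equal_preprocess_text_expansion_py := by
  intro poly _ hpre
  unfold Spec_preprocess_text_expansion_py preprocess_text_expansion_py preprocess_text_expansion_py_alt
  have h := aLoop_eq_bGo poly.toList [] [] 0 hpre
  simpa [rebuildStack, positionsOf] using congrArg String.ofList h
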